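-- pv_equiv track=rewrite | github.com/JemPak/PyProjects | polidivisibles.py | lista_e
-- ===== SOURCE A (Python) =====
-- def lista_e(x):
--     lista=[]
--     lista2=[]
--     ceros="0"
--     uno="1"
--     nueves="9"
--     if x==1:
--         for i in range(0,10):
--             lista2.append(str(i))
--     else:
--         r=uno+((x)*ceros)
--         h=uno+((x)*nueves)
--         for i in range(int(r),int(h)+1):
--             lista.append(str(i))
--         for e in lista:
--             numero=e[1::1]
--             lista2.append(numero)
--     return lista2
-- ===== SOURCE B (Python) =====
-- def lista_e(x):
--     # Build the x-digit strings as a digit-alphabet Cartesian product, one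
--     # prepend pass per digit position, instead of counting integers and
--     # stripping the leading "1".
--     strs = [""]
--     for _ in range(x):
--         strs = [d + s for d in "0123456789" for s in strs]
--     return strs
-- ===== Notes on version B (the rewrite author's own statement) =====
-- stated objective: simpler
-- what changed: B enumerates the x-digit strings directly as a digit-alphabet Cartesian product (one prepend pass per digit position) instead of converting every integer in [10^x, 2*10^x) to a string and slicing off the leading '1'.
import Mathlib
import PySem

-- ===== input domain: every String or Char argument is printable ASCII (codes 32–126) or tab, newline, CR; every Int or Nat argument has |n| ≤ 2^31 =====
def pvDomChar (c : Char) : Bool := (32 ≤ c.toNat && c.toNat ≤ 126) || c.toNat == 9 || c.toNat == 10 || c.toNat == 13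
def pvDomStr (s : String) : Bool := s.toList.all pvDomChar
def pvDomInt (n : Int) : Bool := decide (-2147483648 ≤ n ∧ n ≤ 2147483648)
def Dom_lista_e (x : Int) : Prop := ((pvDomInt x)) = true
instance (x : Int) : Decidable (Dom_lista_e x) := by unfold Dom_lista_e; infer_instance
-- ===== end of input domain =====

-- B enumerates the x-digit strings as a digit-alphabet Cartesian product (one
-- prepend pass per digit position) instead of converting each integer of the
-- x+1-digit range with leading one to a string and slicing that digit off; simpler.


-- ===== PORT A =====
-- int() ported by hand for A's two call sites: Python's int(s) on a NONEMPTY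
-- PURE-DIGIT string (the only strings A ever passes: "1"+x*"0" and "1"+x*"9")
-- is exactly this left fold over the decimal digit values; exact there.
def pvDigitsVal (cs : List Char) : Int :=
  cs.foldl (fun a c => 10 * a + ((c.toNat : Int) - 48)) 0

def lista_e (x : Int) : List String :=
  if x == 1 then
    -- for i in range(0,10): lista2.append(str(i))
    (PySem.List.pyRange 0 10 1).foldl (fun l2 i => l2 ++ [PySem.Int.toStr i]) []
  else
    -- r = uno + x*ceros ; h = uno + x*nueves   (strings kept as char lists)
    let r : List Char := '1' :: PySem.List.pyRepeat ['0'] x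
    let h : List Char := '1' :: PySem.List.pyRepeat ['9'] x
    -- for i in range(int(r), int(h)+1): lista.append(str(i))
    let lista : List String :=
      (PySem.List.pyRange (pvDigitsVal r) (pvDigitsVal h + 1) 1).foldl
        (fun l i => l ++ [PySem.Int.toStr i]) []
    -- for e in lista: lista2.append(e[1::1])   (the step-1 slice from 1 is xs[1:])
    lista.foldl
      (fun l2 e => l2 ++ [String.ofList (PySem.List.slice e.toList (some 1) none)]) []

-- ===== PORT B =====
def lista_e_alt (x : Int) : List String :=
  -- strs = [""] ; for _ in range(x): strs = [d + s for d in "0123456789" for s in strs]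
  (PySem.List.pyRange 0 x 1).foldl
    (fun strs _ =>
      "0123456789".toList.flatMap (fun d => strs.map (fun s => String.ofList (d :: s.toList))))
    [""]

-- ===== PRECONDITION & SPEC =====
def Spec_lista_e (x : Int) (out : List String) : Prop := out = lista_e_alt x
instance (x : Int) (out : List String) : Decidable (Spec_lista_e x out) := by unfold Spec_lista_e; infer_instance

-- ===== CLAIM (what is proved, stated in full; the proofs are below) =====
def Claim_equal_lista_e : Prop := ∀ (x : Int), Dom_lista_e x → Spec_lista_e x (lista_e x)

-- ===== LEMMAS AND PROOFS =====

-- zero-padded width-w decimal digit string of m (recursion on the LAST digit)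
def pvPad : Nat → Nat → List Char
  | 0, _ => []
  | w + 1, m => pvPad w (m / 10) ++ [Nat.digitChar (m % 10)]

-- the common normal form of both ports (A reaches it for every x ≠ 1, B for every x)
def pvNF (k : Nat) : List String :=
  (List.range (10 ^ k)).map (fun m => String.ofList (pvPad k m))

-- pvDigitsVal on A's two argument shapes -----------------------------------
theorem pvDigitsVal_zeros (k : Nat) (a : Int) :
    (List.replicate k '0').foldl (fun a c => 10 * a + ((c.toNat : Int) - 48)) a
      = a * 10 ^ k := by
  induction k generalizing a with
  | zero => simp
  | succ k ih =>
    rw [List.replicate_succ, List.foldl_cons, ih]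
    have h0 : (('0'.toNat : Int)) = 48 := by decide
    rw [h0]; ring

theorem pvDigitsVal_nines (k : Nat) (a : Int) :
    (List.replicate k '9').foldl (fun a c => 10 * a + ((c.toNat : Int) - 48)) a
      = a * 10 ^ k + (10 ^ k - 1) := by
  induction k generalizing a with
  | zero => simp
  | succ k ih =>
    rw [List.replicate_succ, List.foldl_cons, ih]
    have h9 : (('9'.toNat : Int)) = 57 := by decide
    rw [h9]; ring

theorem pvDigitsVal_r (k : Nat) :
    pvDigitsVal ('1' :: List.replicate k '0') = (10 : Int) ^ k := by
  unfold pvDigitsVal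
  rw [List.foldl_cons, pvDigitsVal_zeros]
  have h1 : (('1'.toNat : Int)) = 49 := by decide
  rw [h1]; ring

theorem pvDigitsVal_h (k : Nat) :
    pvDigitsVal ('1' :: List.replicate k '9') = 2 * (10 : Int) ^ k - 1 := by
  unfold pvDigitsVal
  rw [List.foldl_cons, pvDigitsVal_nines]
  have h1 : (('1'.toNat : Int)) = 49 := by decide
  rw [h1]; ring

-- Nat.toDigits: accumulator shift, fuel irrelevance, one-step recurrence ----
theorem pvToDigitsCore_shift (f : Nat) :
    ∀ (n : Nat) (l : List Char),
      Nat.toDigitsCore 10 f n l = Nat.toDigitsCore 10 f n [] ++ l := by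
  induction f with
  | zero => intro n l; simp [Nat.toDigitsCore]
  | succ f ih =>
    intro n l
    simp only [Nat.toDigitsCore]
    by_cases h : n / 10 = 0
    · simp [h]
    · simp only [h, if_false]
      rw [ih (n / 10) ((n % 10).digitChar :: l), ih (n / 10) [(n % 10).digitChar]]
      simp

theorem pvToDigitsCore_fuel (n : Nat) :
    ∀ (f₁ f₂ : Nat) (l : List Char), n < f₁ → n < f₂ →
      Nat.toDigitsCore 10 f₁ n l = Nat.toDigitsCore 10 f₂ n l := by
  induction n using Nat.strong_induction_on with
  | _ n ih =>
    intro f₁ f₂ l h₁ h₂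
    obtain ⟨g₁, rfl⟩ : ∃ g, f₁ = g + 1 := ⟨f₁ - 1, by omega⟩
    obtain ⟨g₂, rfl⟩ : ∃ g, f₂ = g + 1 := ⟨f₂ - 1, by omega⟩
    simp only [Nat.toDigitsCore]
    by_cases h : n / 10 = 0
    · simp [h]
    · simp only [h, if_false]
      have hlt : n / 10 < n := Nat.div_lt_self (by omega) (by omega)
      exact ih (n / 10) hlt g₁ g₂ _ (by omega) (by omega)

theorem pvToDigits_rec (n : Nat) :
    Nat.toDigits 10 n =
      if n < 10 then [Nat.digitChar n]
      else Nat.toDigits 10 (n / 10) ++ [Nat.digitChar (n % 10)] := by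
  by_cases h : n < 10
  · have h0 : n / 10 = 0 := Nat.div_eq_of_lt h
    have hm : n % 10 = n := Nat.mod_eq_of_lt h
    simp [Nat.toDigits, Nat.toDigitsCore, h0, hm, h]
  · have h0 : n / 10 ≠ 0 := by omega
    simp only [Nat.toDigits, Nat.toDigitsCore, h0, if_false, h]
    rw [pvToDigitsCore_shift n (n / 10) [(n % 10).digitChar]]
    have hlt : n / 10 < n := Nat.div_lt_self (by omega) (by omega)
    rw [pvToDigitsCore_fuel (n / 10) n (n / 10 + 1) [] (by omega) (by omega)]
    rfl

-- str(10^k + m) is '1' followed by m zero-padded to width k ----------------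
theorem pvToDigits_pad (k : Nat) :
    ∀ m : Nat, m < 10 ^ k →
      Nat.toDigits 10 (10 ^ k + m) = '1' :: pvPad k m := by
  induction k with
  | zero =>
    intro m hm
    interval_cases m
    simp [pvPad]
    decide
  | succ k ih =>
    intro m hm
    have h10 : ¬ (10 ^ (k + 1) + m < 10) := by
      have : 10 * 10 ^ k ≤ 10 ^ (k + 1) := by rw [pow_succ]; omega
      omega
    rw [pvToDigits_rec, if_neg h10]
    have hdiv : (10 ^ (k + 1) + m) / 10 = 10 ^ k + m / 10 := by
      rw [pow_succ, mul_comm, Nat.mul_add_div (by omega)]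
    have hmod : (10 ^ (k + 1) + m) % 10 = m % 10 := by
      rw [pow_succ, mul_comm, Nat.mul_add_mod]
    rw [hdiv, hmod, ih (m / 10) (by rw [pow_succ] at hm; omega)]
    rfl

-- B's prepend pass peels the LEADING digit off pvPad -----------------------
theorem pvPad_cons (k : Nat) :
    ∀ d m : Nat, d < 10 → m < 10 ^ k →
      pvPad (k + 1) (d * 10 ^ k + m) = Nat.digitChar d :: pvPad k m := by
  induction k with
  | zero =>
    intro d m hd hm
    interval_cases m
    simp [pvPad, Nat.mod_eq_of_lt hd]
  | succ k ih =>
    intro d m hd hm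
    have hdiv : (d * 10 ^ (k + 1) + m) / 10 = d * 10 ^ k + m / 10 := by
      rw [pow_succ, mul_comm (10 ^ k) 10, ← mul_assoc, mul_comm d 10, mul_assoc,
        Nat.mul_add_div (by omega)]
    have hmod : (d * 10 ^ (k + 1) + m) % 10 = m % 10 := by
      rw [pow_succ, mul_comm (10 ^ k) 10, ← mul_assoc, mul_comm d 10, mul_assoc,
        Nat.mul_add_mod]
    show pvPad (k + 1 + 1) _ = _
    rw [pvPad, hdiv, hmod, ih d (m / 10) hd (by rw [pow_succ] at hm; omega)]
    rfl

theorem pvRange_mul (N : Nat) :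
    ∀ c : Nat, List.range (c * N) =
      (List.range c).flatMap (fun d => (List.range N).map (fun m => d * N + m)) := by
  intro c
  induction c with
  | zero => simp
  | succ c ih =>
    rw [Nat.succ_mul, List.range_add, ih, List.range_succ]
    simp

theorem pvFoldl_const_iterate {α β : Type} (g : α → α) (l : List β) (init : α) :
    l.foldl (fun a _ => g a) init = g^[l.length] init := by
  induction l generalizing init with
  | nil => rfl
  | cons b t ih => simp [List.foldl_cons, ih, Function.iterate_succ_apply]

-- A-side normal form (every x ≠ 1; for x < 0 the replicates are empty, k = 0)
theorem pvA_eq (x : Int) (hx : x ≠ 1) : lista_e x = pvNF x.toNat := by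
  have hbeq : (x == 1) = false := by simp [hx]
  set k := x.toNat with hk
  unfold lista_e
  rw [hbeq]
  simp only [Bool.false_eq_true, if_false, PySem.List.pyRepeat_singleton, ← hk,
    pvDigitsVal_r, pvDigitsVal_h]
  rw [PySem.List.foldl_append_singleton_eq_map, List.nil_append]
  rw [PySem.List.foldl_append_singleton_eq_map, List.nil_append]
  have hbound : (2 * (10 : Int) ^ k - 1 + 1) = (10 : Int) ^ k + (10 : Int) ^ k := by ring
  rw [hbound, PySem.List.pyRange_one]
  have hcount : ((10 : Int) ^ k + 10 ^ k - 10 ^ k).toNat = 10 ^ k := by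
    have h1 : ((10 : Int) ^ k + 10 ^ k - 10 ^ k) = ((10 ^ k : Nat) : Int) := by push_cast; ring
    rw [h1, Int.toNat_natCast]
  rw [hcount, List.map_map, List.map_map]
  unfold pvNF
  apply List.map_congr_left
  intro m hm
  have hmlt : m < 10 ^ k := List.mem_range.mp hm
  have hcast : ((10 : Int) ^ k + (m : Int)) = ((10 ^ k + m : Nat) : Int) := by push_cast; ring
  simp only [Function.comp_apply, hcast]
  rw [PySem.Int.toList_toStr]
  have htc : ∀ n : Nat, PySem.Int.toChars ((n : Nat) : Int) = Nat.toDigits 10 n := by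
    intro n
    simp only [PySem.Int.toChars]
    rw [if_neg (not_lt.mpr (Int.natCast_nonneg n)), Int.toNat_natCast]
  rw [htc (10 ^ k + m), pvToDigits_pad k m hmlt, PySem.List.slice_from_one]
  rfl

-- B-side: iterating the prepend pass k times yields pvNF k ------------------
theorem pvB_iter (k : Nat) :
    (fun strs : List String =>
      "0123456789".toList.flatMap (fun d => strs.map (fun s => String.ofList (d :: s.toList))))^[k] [""]
      = pvNF k := by
  induction k with
  | zero => rfl
  | succ k ih =>
    rw [Function.iterate_succ_apply', ih]
    show "0123456789".toList.flatMap
        (fun d => (pvNF k).map (fun s => String.ofList (d :: s.toList))) = pvNF (k + 1)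
    have hdig : "0123456789".toList = (List.range 10).map Nat.digitChar := by decide
    rw [hdig, List.flatMap_map]
    unfold pvNF
    have h10 : 10 ^ (k + 1) = 10 * 10 ^ k := by rw [pow_succ]; ring
    rw [h10, pvRange_mul (10 ^ k) 10, List.map_flatMap]
    apply List.flatMap_congr
    intro d hd
    rw [List.map_map, List.map_map]
    apply List.map_congr_left
    intro m hm
    simp only [Function.comp_apply, String.toList_ofList]
    rw [pvPad_cons k d m (List.mem_range.mp hd) (List.mem_range.mp hm)]

theorem pvB_eq (x : Int) : lista_e_alt x = pvNF x.toNat := by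
  unfold lista_e_alt
  rw [pvFoldl_const_iterate]
  have hlen : (PySem.List.pyRange 0 x 1).length = x.toNat := by
    rw [PySem.List.length_pyRange_one]
    omega
  rw [hlen, pvB_iter]

-- ===== VERDICT (by name: the statement is the Claim_ definition above) =====
theorem lista_e_spec : Claim_equal_lista_e := by
  intro x _
  unfold Spec_lista_e
  by_cases hx : x = 1
  · subst hx; decide
  · rw [pvA_eq x hx, pvB_eq]
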